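-- pv_equiv track=rewrite | github.com/inf8212/INF8212_Labo_Automne2020 | Exercice_d_integration/code/apparimentsEtendus.py | apparimentsEtendus
-- ===== SOURCE A (Python) =====
-- def apparimentsEtendus(s, t):
--
--     n = len(s)
--     if len(t) != n: return None
--
--     dictionnary = {}   # Va servir à stocker les positions de t pour les valeurs de s (les valeurs de s sont les clés du dictionnaire)
--     positions   = []
--     for i in range(n):
--         if s[i] not in dictionnary:
--             dictionnary[s[i]] = []
--             for j in range(n):
--                 if t[j] == s[i]:
--                     dictionnary[s[i]].append(j)
--                     positions.append((i, j))
--         else: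
--             for j in dictionnary[s[i]]:
--                 positions.append((i, j))
--
--
--     return positions
-- ===== SOURCE B (Python) =====
-- def apparimentsEtendus(s, t):
--     n = len(s)
--     if len(t) != n: return None
--     positions = []
--     for i in range(n):
--         for j in range(n):
--             if s[i] == t[j]:
--                 positions.append((i, j))
--     return positions
-- ===== Notes on version B (the rewrite author's own statement) =====
-- stated objective: simpler
-- what changed: B drops A's memo dictionary (build-positions-index-then-replay for repeated values) and uses one uniform nested scan appending (i,j) whenever s[i]==t[j], which yields the same pairs in the same order.
import Mathlib
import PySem

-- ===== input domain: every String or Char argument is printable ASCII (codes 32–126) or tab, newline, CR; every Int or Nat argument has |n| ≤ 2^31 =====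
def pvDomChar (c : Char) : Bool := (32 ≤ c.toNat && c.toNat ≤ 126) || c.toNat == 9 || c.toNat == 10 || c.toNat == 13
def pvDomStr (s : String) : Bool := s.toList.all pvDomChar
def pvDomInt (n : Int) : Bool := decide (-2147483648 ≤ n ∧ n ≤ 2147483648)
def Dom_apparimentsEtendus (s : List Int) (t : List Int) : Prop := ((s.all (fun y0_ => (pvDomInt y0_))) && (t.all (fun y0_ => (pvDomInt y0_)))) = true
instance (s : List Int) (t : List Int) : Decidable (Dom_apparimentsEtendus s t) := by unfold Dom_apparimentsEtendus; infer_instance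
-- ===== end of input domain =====

-- B replaces A's memo dictionary (index t once per distinct value, replay on repeats)
-- with one uniform nested scan; same return value, objective: simpler.


-- ===== PORT A =====
def apparimentsEtendus (s : List Int) (t : List Int) : Option (List (Int × Int)) :=
  let n : Int := (s.length : Int)
  if (t.length : Int) ≠ n then none
  else
    let st :=
      (PySem.List.pyRange 0 n 1).foldl
        (fun (st : PySem.Dict Int (List Int) × List (Int × Int)) i =>
          let si := PySem.List.pyGetD s i 0
          match st.1.get? si with
          | none =>
              (PySem.List.pyRange 0 n 1).foldl
                (fun st2 j =>
                  if PySem.List.pyGetD t j 0 == si then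
                    (st2.1.modify si [] (fun l => l ++ [j]), st2.2 ++ [(i, j)])
                  else st2)
                (st.1.insert si [], st.2)
          | some js => (st.1, st.2 ++ js.map (fun j => (i, j))))
        (PySem.Dict.empty, [])
    some st.2

-- ===== PORT B =====
def apparimentsEtendus_alt (s : List Int) (t : List Int) : Option (List (Int × Int)) :=
  let n : Int := (s.length : Int)
  if (t.length : Int) ≠ n then none
  else
    some ((PySem.List.pyRange 0 n 1).foldl
      (fun pos i =>
        (PySem.List.pyRange 0 n 1).foldl
          (fun pos j =>
            if PySem.List.pyGetD s i 0 == PySem.List.pyGetD t j 0 then pos ++ [(i, j)]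
            else pos)
          pos)
      [])

-- ===== PRECONDITION & SPEC =====
def Spec_apparimentsEtendus (s : List Int) (t : List Int) (out : Option (List (Int × Int))) : Prop := out = apparimentsEtendus_alt s t
instance (s : List Int) (t : List Int) (out : Option (List (Int × Int))) : Decidable (Spec_apparimentsEtendus s t out) := by unfold Spec_apparimentsEtendus; infer_instance

-- ===== CLAIM (what is proved, stated in full; the proofs are below) =====
def Claim_equal_apparimentsEtendus : Prop := ∀ (s : List Int) (t : List Int), Dom_apparimentsEtendus s t → Spec_apparimentsEtendus s t (apparimentsEtendus s t)

-- ===== LEMMAS AND PROOFS =====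

-- the j's of t matching value v, in order (what A caches in its dictionary for key v)
def pvMatch (t : List Int) (n : Int) (v : Int) : List Int :=
  (PySem.List.pyRange 0 n 1).filter (fun j => PySem.List.pyGetD t j 0 == v)

-- dict component of A's new-key inner loop
theorem pvFoldModify_getD (p : Int → Bool) (v : Int) :
    ∀ (l : List Int) (d : PySem.Dict Int (List Int)),
      (l.foldl (fun d j => if p j then d.modify v [] (fun c => c ++ [j]) else d) d).getD v []
        = d.getD v [] ++ l.filter p := by
  intro l
  induction l with
  | nil => intro d; simp
  | cons x xs ih =>
      intro d
      by_cases hx : p x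
      · simp [hx, ih, PySem.Dict.getD_modify_self]
      · simp [hx, ih]

theorem pvGet?_modify_of_ne (d : PySem.Dict Int (List Int)) (v w : Int)
    (f : List Int → List Int) (hw : w ≠ v) :
    (d.modify v [] f).get? w = d.get? w := by
  have h : d.modify v [] f = d.insert v (f (d.getD v [])) := rfl
  rw [h]
  exact PySem.Dict.get?_insert_of_ne _ _ hw

theorem pvFoldModify_get?_ne (p : Int → Bool) (v w : Int) (hw : w ≠ v) :
    ∀ (l : List Int) (d : PySem.Dict Int (List Int)),
      (l.foldl (fun d j => if p j then d.modify v [] (fun c => c ++ [j]) else d) d).get? w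
        = d.get? w := by
  intro l
  induction l with
  | nil => intro d; simp
  | cons x xs ih =>
      intro d
      by_cases hx : p x
      · simp [hx, ih, pvGet?_modify_of_ne _ _ _ _ hw]
      · simp [hx, ih]

theorem pvFoldModify_contains (p : Int → Bool) (v : Int) :
    ∀ (l : List Int) (d : PySem.Dict Int (List Int)),
      (l.foldl (fun d j => if p j then d.modify v [] (fun c => c ++ [j]) else d) d).contains v
        = (d.contains v || l.any p) := by
  intro l
  induction l with
  | nil => intro d; simp
  | cons x xs ih =>
      intro d
      by_cases hx : p x
      · simp [hx, ih, PySem.Dict.contains_modify]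
      · simp [hx, ih]

-- the invariant A's dictionary satisfies
def pvInv (t : List Int) (n : Int) (d : PySem.Dict Int (List Int)) : Prop :=
  ∀ v, d.get? v = none ∨ d.get? v = some (pvMatch t n v)

-- A's outer loop, under the invariant, just concatenates the per-i match blocks
theorem pvOuterA (s t : List Int) (n : Int) :
    ∀ (L : List Int) (d : PySem.Dict Int (List Int)) (pos : List (Int × Int)), pvInv t n d →
      (L.foldl
        (fun (st : PySem.Dict Int (List Int) × List (Int × Int)) i =>
          let si := PySem.List.pyGetD s i 0
          match st.1.get? si with
          | none =>
              (PySem.List.pyRange 0 n 1).foldl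
                (fun st2 j =>
                  if PySem.List.pyGetD t j 0 == si then
                    (st2.1.modify si [] (fun l => l ++ [j]), st2.2 ++ [(i, j)])
                  else st2)
                (st.1.insert si [], st.2)
          | some js => (st.1, st.2 ++ js.map (fun j => (i, j))))
        (d, pos)).2
      = pos ++ L.flatMap (fun i => (pvMatch t n (PySem.List.pyGetD s i 0)).map (fun j => (i, j))) := by
  intro L
  induction L with
  | nil => intro d pos _; simp
  | cons i L ih =>
      intro d pos hinv
      simp only [List.foldl_cons, List.flatMap_cons]
      set si := PySem.List.pyGetD s i 0 with hsi
      rcases hinv si with hnone | hsome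
      · -- new key: split the paired inner fold into its two components
        simp only [hnone]
        have hsplit :
            ((PySem.List.pyRange 0 n 1).foldl
              (fun (st2 : PySem.Dict Int (List Int) × List (Int × Int)) j =>
                if PySem.List.pyGetD t j 0 == si then
                  (st2.1.modify si [] (fun l => l ++ [j]), st2.2 ++ [(i, j)])
                else st2)
              (d.insert si [], pos))
            = ((PySem.List.pyRange 0 n 1).foldl
                 (fun d' j => if PySem.List.pyGetD t j 0 == si then d'.modify si [] (fun l => l ++ [j]) else d')
                 (d.insert si []),
               (PySem.List.pyRange 0 n 1).foldl
                 (fun p j => if PySem.List.pyGetD t j 0 == si then p ++ [(i, j)] else p)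
                 pos) := by
          have hcongr : ∀ (st2 : PySem.Dict Int (List Int) × List (Int × Int)) (j : Int),
              (if PySem.List.pyGetD t j 0 == si then
                  (st2.1.modify si [] (fun l => l ++ [j]), st2.2 ++ [(i, j)])
                else st2)
              = ((if PySem.List.pyGetD t j 0 == si then st2.1.modify si [] (fun l => l ++ [j]) else st2.1),
                 (if PySem.List.pyGetD t j 0 == si then st2.2 ++ [(i, j)] else st2.2)) := by
            intro st2 j; split <;> rfl
          rw [PySem.List.foldl_congr_mem (PySem.List.pyRange 0 n 1) _
                (fun (st2 : PySem.Dict Int (List Int) × List (Int × Int)) j =>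
                  ((if PySem.List.pyGetD t j 0 == si then st2.1.modify si [] (fun l => l ++ [j]) else st2.1),
                   (if PySem.List.pyGetD t j 0 == si then st2.2 ++ [(i, j)] else st2.2)))
                (d.insert si [], pos) (fun acc x _ => hcongr acc x)]
          exact PySem.List.foldl_prod_mk
            (fun (d' : PySem.Dict Int (List Int)) j => if PySem.List.pyGetD t j 0 == si then d'.modify si [] (fun l => l ++ [j]) else d')
            (fun p j => if PySem.List.pyGetD t j 0 == si then p ++ [(i, j)] else p) _ _ _
        rw [hsplit, ih]
        · rw [PySem.List.foldl_append_if]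
          simp [pvMatch, List.append_assoc]
        · -- invariant after the inner loop
          intro w
          by_cases hw : w = si
          · right
            rw [hw]
            have hc : ((PySem.List.pyRange 0 n 1).foldl
                (fun d' j => if PySem.List.pyGetD t j 0 == si then d'.modify si [] (fun l => l ++ [j]) else d')
                (d.insert si [])).contains si = true := by
              rw [pvFoldModify_contains]
              simp [PySem.Dict.contains_insert_self]
            have hg := pvFoldModify_getD (fun j => PySem.List.pyGetD t j 0 == si) si
              (PySem.List.pyRange 0 n 1) (d.insert si [])
            rw [PySem.Dict.getD_insert_self] at hg
            rcases ho : ((PySem.List.pyRange 0 n 1).foldl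
                (fun d' j => if PySem.List.pyGetD t j 0 == si then d'.modify si [] (fun l => l ++ [j]) else d')
                (d.insert si [])).get? si with _ | js
            · rw [PySem.Dict.contains_eq_isSome_get?, ho] at hc; simp at hc
            · have hjs : js = pvMatch t n si := by
                have h2 := PySem.Dict.getD_of_get?_eq_some _ [] ho
                rw [hg] at h2
                simp [pvMatch, ← h2]
              rw [ho, hjs]
          · rw [pvFoldModify_get?_ne _ _ _ hw, PySem.Dict.get?_insert_of_ne _ _ hw]
            exact hinv w
      · -- seen key: replay the cached list
        simp only [hsome, ih _ _ hinv]
        simp [List.append_assoc]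

-- B's nested loop computes the same concatenation of match blocks
theorem pvOuterB (s t : List Int) (n : Int) :
    ∀ (L : List Int) (pos : List (Int × Int)),
      (L.foldl
        (fun pos i =>
          (PySem.List.pyRange 0 n 1).foldl
            (fun pos j =>
              if PySem.List.pyGetD s i 0 == PySem.List.pyGetD t j 0 then pos ++ [(i, j)]
              else pos)
            pos)
        pos)
      = pos ++ L.flatMap (fun i => (pvMatch t n (PySem.List.pyGetD s i 0)).map (fun j => (i, j))) := by
  intro L
  induction L with
  | nil => intro pos; simp
  | cons i L ih =>
      intro pos
      simp only [List.foldl_cons, List.flatMap_cons]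
      rw [PySem.List.foldl_append_if, ih]
      have : (PySem.List.pyRange 0 n 1).filter
            (fun j => PySem.List.pyGetD s i 0 == PySem.List.pyGetD t j 0)
          = pvMatch t n (PySem.List.pyGetD s i 0) := by
        unfold pvMatch
        exact List.filter_congr (fun j _ => by simp [BEq.comm])
      rw [this, List.append_assoc]

-- ===== VERDICT (by name: the statement is the Claim_ definition above) =====
theorem apparimentsEtendus_spec : Claim_equal_apparimentsEtendus := by
  intro s t _
  unfold Spec_apparimentsEtendus apparimentsEtendus apparimentsEtendus_alt
  by_cases h : (t.length : Int) ≠ (s.length : Int)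
  · simp [h]
  · simp only [h, if_false]
    rw [pvOuterA s t (s.length : Int) _ _ _ (fun v => Or.inl (PySem.Dict.get?_empty v)),
        pvOuterB s t (s.length : Int)]
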